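-- pv_equiv track=rewrite | github.com/marcoputon/GA_pathfinder | Subject.py | where_to
-- ===== SOURCE A (Python) =====
-- def where_to(a, n, wt):
-- 	for i in n:
-- 		if i[0] - a[0] > 0:		#	Lest
-- 			if wt == 'L':
-- 				return i
-- 		elif i[0] - a[0] < 0:	#	West
-- 			if wt == 'W':
-- 				return i
-- 		elif i[1] - a[1] > 0:	#	North
-- 			if wt == 'N':
-- 				return i
-- 		elif i[1] - a[1] < 0:	#	South
-- 			if wt == 'S':
-- 				return i
-- 		elif i[2] - a[2] > 0:	#	Up
-- 			if wt == 'U':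
-- 				return i
-- 		elif i[2] - a[2] < 0:	#	Down
-- 			if wt == 'D':
-- 				return i
-- 	return None
-- ===== SOURCE B (Python) =====
-- def direction(a, i):
--     dx = i[0] - a[0]
--     dy = i[1] - a[1]
--     dz = i[2] - a[2]
--     if dx:
--         return 'L' if dx > 0 else 'W'
--     if dy:
--         return 'N' if dy > 0 else 'S'
--     if dz:
--         return 'U' if dz > 0 else 'D'
--     return None
--
-- def where_to(a, n, wt):
--     # Pre-index the neighbors: walking back-to-front and overwriting leaves,
--     # for every direction letter, the FIRST neighbor lying in that direction.
--     firsts = {}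
--     for i in reversed(n):
--         d = direction(a, i)
--         if d is not None:
--             firsts[d] = i
--     return firsts.get(wt)
-- ===== Notes on version B (the rewrite author's own statement) =====
-- stated objective: alternative
-- what changed: Instead of scanning for the one requested direction with a six-way branch cascade and early return, B walks the neighbor list once in reverse building a dict from each direction letter to its first neighbor in that direction (overwrite-on-reverse keeps the earliest), then answers with a single dict lookup firsts.get(wt).
import Mathlib
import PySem

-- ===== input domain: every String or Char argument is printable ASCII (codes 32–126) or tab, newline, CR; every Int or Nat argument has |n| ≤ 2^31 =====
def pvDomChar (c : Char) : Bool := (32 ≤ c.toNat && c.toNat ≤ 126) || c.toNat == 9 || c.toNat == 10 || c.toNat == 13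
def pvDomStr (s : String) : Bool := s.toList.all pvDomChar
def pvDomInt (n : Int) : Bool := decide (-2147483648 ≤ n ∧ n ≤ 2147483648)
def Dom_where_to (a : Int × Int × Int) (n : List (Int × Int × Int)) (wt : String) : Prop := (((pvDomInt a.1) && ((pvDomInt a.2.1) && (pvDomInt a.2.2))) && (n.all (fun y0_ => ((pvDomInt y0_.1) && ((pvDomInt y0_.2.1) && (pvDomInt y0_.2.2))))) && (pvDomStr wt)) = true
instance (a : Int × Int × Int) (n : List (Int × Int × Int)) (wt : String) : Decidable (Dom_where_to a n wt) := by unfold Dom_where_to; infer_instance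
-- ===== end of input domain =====

-- B: builds a dict of first-neighbor-per-direction in one reverse pass, then answers with a lookup (alternative decomposition; same O(n))

-- ===== PORT A =====
def where_to (a : Int × Int × Int) (n : List (Int × Int × Int)) (wt : String) : Option (Int × Int × Int) :=
  match n with
  | [] => none
  | i :: rest =>
    if i.1 - a.1 > 0 then
      (if wt = "L" then some i else where_to a rest wt)
    else if i.1 - a.1 < 0 then
      (if wt = "W" then some i else where_to a rest wt)
    else if i.2.1 - a.2.1 > 0 then
      (if wt = "N" then some i else where_to a rest wt)
    else if i.2.1 - a.2.1 < 0 then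
      (if wt = "S" then some i else where_to a rest wt)
    else if i.2.2 - a.2.2 > 0 then
      (if wt = "U" then some i else where_to a rest wt)
    else if i.2.2 - a.2.2 < 0 then
      (if wt = "D" then some i else where_to a rest wt)
    else where_to a rest wt

-- ===== PORT B =====
-- B-side helper: the direction letter of neighbor i seen from a (None if identical)
def pvDirection (a i : Int × Int × Int) : Option String :=
  let dx := i.1 - a.1
  let dy := i.2.1 - a.2.1
  let dz := i.2.2 - a.2.2
  if dx ≠ 0 then some (if dx > 0 then "L" else "W")
  else if dy ≠ 0 then some (if dy > 0 then "N" else "S")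
  else if dz ≠ 0 then some (if dz > 0 then "U" else "D")
  else none

def where_to_alt (a : Int × Int × Int) (n : List (Int × Int × Int)) (wt : String) : Option (Int × Int × Int) :=
  let firsts := n.reverse.foldl (fun d i =>
    match pvDirection a i with
    | some c => d.insert c i
    | none => d) (PySem.Dict.empty : PySem.Dict String (Int × Int × Int))
  firsts.get? wt

-- ===== PRECONDITION & SPEC =====
def Spec_where_to (a : Int × Int × Int) (n : List (Int × Int × Int)) (wt : String) (out : Option (Int × Int × Int)) : Prop := out = where_to_alt a n wt
instance (a : Int × Int × Int) (n : List (Int × Int × Int)) (wt : String) (out : Option (Int × Int × Int)) : Decidable (Spec_where_to a n wt out) := by unfold Spec_where_to; infer_instance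

-- ===== CLAIM =====
def Claim_equal_where_to : Prop := ∀ (a : Int × Int × Int) (n : List (Int × Int × Int)) (wt : String), Dom_where_to a n wt → Spec_where_to a n wt (where_to a n wt)

-- ===== LEMMAS AND PROOFS =====
-- A's body, phrased through the classification of the head neighbor
lemma where_to_cons (a i : Int × Int × Int) (rest : List (Int × Int × Int)) (wt : String) :
    where_to a (i :: rest) wt =
      if pvDirection a i = some wt then some i else where_to a rest wt := by
  simp only [where_to, pvDirection]
  by_cases h1 : i.1 - a.1 > 0
  · by_cases hw : wt = "L" <;>
      simp [hw, eq_comm, show a.1 < i.1 by omega, show ¬ i.1 ≤ a.1 by omega,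
        show i.1 - a.1 ≠ 0 by omega]
  by_cases h2 : i.1 - a.1 < 0
  · by_cases hw : wt = "W" <;>
      simp [hw, eq_comm, show ¬ a.1 < i.1 by omega, show i.1 < a.1 by omega,
        show i.1 ≤ a.1 by omega, show i.1 - a.1 ≠ 0 by omega]
  by_cases h3 : i.2.1 - a.2.1 > 0
  · by_cases hw : wt = "N" <;>
      simp [hw, eq_comm, show ¬ a.1 < i.1 by omega, show ¬ i.1 < a.1 by omega,
        show i.1 - a.1 = 0 by omega, show a.2.1 < i.2.1 by omega,
        show ¬ i.2.1 ≤ a.2.1 by omega, show i.2.1 - a.2.1 ≠ 0 by omega]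
  by_cases h4 : i.2.1 - a.2.1 < 0
  · by_cases hw : wt = "S" <;>
      simp [hw, eq_comm, show ¬ a.1 < i.1 by omega, show ¬ i.1 < a.1 by omega,
        show i.1 - a.1 = 0 by omega, show ¬ a.2.1 < i.2.1 by omega,
        show i.2.1 < a.2.1 by omega, show i.2.1 ≤ a.2.1 by omega,
        show i.2.1 - a.2.1 ≠ 0 by omega]
  by_cases h5 : i.2.2 - a.2.2 > 0
  · by_cases hw : wt = "U" <;>
      simp [hw, eq_comm, show ¬ a.1 < i.1 by omega, show ¬ i.1 < a.1 by omega,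
        show i.1 - a.1 = 0 by omega, show ¬ a.2.1 < i.2.1 by omega,
        show ¬ i.2.1 < a.2.1 by omega, show i.2.1 - a.2.1 = 0 by omega,
        show a.2.2 < i.2.2 by omega, show ¬ i.2.2 ≤ a.2.2 by omega,
        show i.2.2 - a.2.2 ≠ 0 by omega]
  by_cases h6 : i.2.2 - a.2.2 < 0
  · by_cases hw : wt = "D" <;>
      simp [hw, eq_comm, show ¬ a.1 < i.1 by omega, show ¬ i.1 < a.1 by omega,
        show i.1 - a.1 = 0 by omega, show ¬ a.2.1 < i.2.1 by omega,
        show ¬ i.2.1 < a.2.1 by omega, show i.2.1 - a.2.1 = 0 by omega,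
        show ¬ a.2.2 < i.2.2 by omega, show i.2.2 < a.2.2 by omega,
        show i.2.2 ≤ a.2.2 by omega, show i.2.2 - a.2.2 ≠ 0 by omega]
  simp [show ¬ a.1 < i.1 by omega, show ¬ i.1 < a.1 by omega,
    show i.1 - a.1 = 0 by omega, show ¬ a.2.1 < i.2.1 by omega,
    show ¬ i.2.1 < a.2.1 by omega, show i.2.1 - a.2.1 = 0 by omega,
    show ¬ a.2.2 < i.2.2 by omega, show ¬ i.2.2 < a.2.2 by omega,
    show i.2.2 - a.2.2 = 0 by omega]

-- B's body, one cons step: the head is inserted LAST (reverse fold), so it overwrites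
lemma alt_cons (a i : Int × Int × Int) (rest : List (Int × Int × Int)) (wt : String) :
    where_to_alt a (i :: rest) wt =
      if pvDirection a i = some wt then some i else where_to_alt a rest wt := by
  unfold where_to_alt
  rw [List.reverse_cons, List.foldl_append]
  rw [List.foldl_cons, List.foldl_nil]
  cases hc : pvDirection a i with
  | none => simp
  | some c =>
    rw [PySem.Dict.get?_insert]
    by_cases h : wt = c
    · simp [h]
    · simp [h, Ne.symm h]

lemma eq_all (a : Int × Int × Int) (n : List (Int × Int × Int)) (wt : String) :
    where_to a n wt = where_to_alt a n wt := by
  induction n with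
  | nil => simp [where_to, where_to_alt]
  | cons i rest ih => rw [where_to_cons, alt_cons, ih]

theorem where_to_spec : Claim_equal_where_to := by
  intro a n wt _
  exact eq_all a n wt
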